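-- pv_equiv track=rewrite | github.com/google/emboss | compiler/back_end/cpp/header_generator.py | _split_enum_case_values_into_spans
-- ===== SOURCE A (Python) =====
-- def _split_enum_case_values_into_spans(enum_case_value):
--     """Yields spans containing each enum case in an enum_case attribute value.
--
--     Arguments:
--         enum_case_value: the value of the `enum_case` attribute to be parsed.
--
--     Returns:
--         An iterator over spans, where each span covers one enum case name.
--         Each span is a half-open range of the form [start, end), which is the
--         start and end position relative to the beginning of the enum_case_value
--         string.  The name can be retrieved with `enum_case_value[start:end]`.
--
--         To keep the grammar of this attribute simple, this only splits on
--         delimiters and trims whitespace for each case.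
--
--     Example: 'SHOUTY_CASE, kCamelCase' -> [(0, 11), (13, 23)]"""
--     # Scan the string from left to right, finding commas and trimming whitespace.
--     # This is essentially equivalent to (x.trim() fror x in str.split(','))
--     # except that this yields spans within the string rather than the strings
--     # themselves, and no span is yielded for a trailing comma.
--     start, end = 0, len(enum_case_value)
--     while start <= end:
--         # Find a ',' delimiter to split on
--         delimiter = enum_case_value.find(",", start, end)
--         if delimiter < 0:
--             delimiter = end
--
--         substr_start = start
--         substr_end = delimiter
--
--         # Drop leading whitespace
--         while substr_start < substr_end and enum_case_value[substr_start].isspace():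
--             substr_start += 1
--         # Drop trailing whitespace
--         while substr_start < substr_end and enum_case_value[substr_end - 1].isspace():
--             substr_end -= 1
--
--         # Skip a trailing comma
--         if substr_start == end and start != 0:
--             break
--
--         yield substr_start, substr_end
--         start = delimiter + 1
-- ===== SOURCE B (Python) =====
-- def _split_enum_case_values_into_spans(enum_case_value):
--     """Yields trimmed [start, end) spans for each comma-separated enum case name.
--
--     Splits the string once with str.split(',') and walks the pieces with a
--     running offset, instead of scanning with find() and index arithmetic."""
--     pieces = enum_case_value.split(",")
--     offset = 0
--     for i, piece in enumerate(pieces):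
--         stripped = piece.strip()
--         # No span for a trailing comma: skip a final all-whitespace piece,
--         # unless it is the only piece.
--         if stripped == "" and i == len(pieces) - 1 and i > 0:
--             break
--         lead = len(piece) - len(piece.lstrip())
--         yield offset + lead, offset + lead + len(stripped)
--         offset += len(piece) + 1
-- ===== Notes on version B (the rewrite author's own statement) =====
-- stated objective: simpler
-- what changed: B replaces A's manual find(',')/index-scanning loop (with per-character while loops trimming whitespace) by one str.split(',') call and offset arithmetic over the pieces, using lstrip/strip lengths to compute each trimmed span.
import Mathlib
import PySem

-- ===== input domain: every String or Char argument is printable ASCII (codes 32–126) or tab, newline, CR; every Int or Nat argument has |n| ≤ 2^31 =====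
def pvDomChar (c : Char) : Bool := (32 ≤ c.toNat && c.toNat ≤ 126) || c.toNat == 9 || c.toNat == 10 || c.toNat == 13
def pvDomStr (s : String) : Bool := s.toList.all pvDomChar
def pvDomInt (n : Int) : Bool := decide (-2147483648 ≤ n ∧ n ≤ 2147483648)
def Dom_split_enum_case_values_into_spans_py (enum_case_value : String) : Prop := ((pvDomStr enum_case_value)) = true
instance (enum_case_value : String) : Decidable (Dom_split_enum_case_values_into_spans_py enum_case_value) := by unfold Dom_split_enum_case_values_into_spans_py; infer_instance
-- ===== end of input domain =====

-- B replaces A's in-string find()/index-scanning loops by one split(',') pass with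
-- running-offset arithmetic (objective: simpler, same O(n) cost).


-- ===== PORT A =====

-- `while substr_start < substr_end and enum_case_value[substr_start].isspace(): substr_start += 1`
-- (the index is always in range when this loop reads it, so pyGetD is exact here)
def pvA_lead (cs : List Char) (se ss : Int) : Int :=
  if h : ss < se ∧ PySem.Chars.isspace (PySem.List.pyGetD cs ss ' ') = true then
    pvA_lead cs se (ss + 1)
  else ss
  termination_by (se - ss).toNat
  decreasing_by omega

-- `while substr_start < substr_end and enum_case_value[substr_end - 1].isspace(): substr_end -= 1`
def pvA_trail (cs : List Char) (ss se : Int) : Int :=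
  if h : ss < se ∧ PySem.Chars.isspace (PySem.List.pyGetD cs (se - 1) ' ') = true then
    pvA_trail cs ss (se - 1)
  else se
  termination_by (se - ss).toNat
  decreasing_by omega

-- termination helpers for the main loop (cited by decreasing_by below)
theorem pv_ff_aux (st st' e' r : Int) (hst : st ≤ st') (hr : -1 ≤ r) :
    (if e' < st' then (-1 : Int) else if r = -1 then -1 else st' + r) = -1 ∨
      st ≤ (if e' < st' then (-1 : Int) else if r = -1 then -1 else st' + r) := by
  split_ifs <;> omega

theorem pv_findFrom_lower (s sub : List Char) (st : Int) (e? : Option Int) :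
    PySem.Chars.findFrom s sub st e? = -1 ∨ st ≤ PySem.Chars.findFrom s sub st e? := by
  unfold PySem.Chars.findFrom
  cases e? <;>
    exact pv_ff_aux st _ _ _ (by split_ifs <;> omega) (PySem.Chars.neg_one_le_find _ _)

-- the main `while start <= end` loop of A
def pvA_loop (cs : List Char) (endI start : Int) : List (Int × Int) :=
  if hle : start ≤ endI then
    let d0 := PySem.Chars.findFrom cs [','] start (some endI)
    let delim := if d0 < 0 then endI else d0
    let ss := pvA_lead cs delim start
    let se := pvA_trail cs ss delim
    if ss = endI ∧ start ≠ 0 then []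
    else (ss, se) :: pvA_loop cs endI (delim + 1)
  else []
  termination_by (endI + 1 - start).toNat
  decreasing_by
    have hf := pv_findFrom_lower cs [','] start (some endI)
    split <;> rcases hf with hf | hf <;> omega

def split_enum_case_values_into_spans_py (enum_case_value : String) : List (Int × Int) :=
  pvA_loop enum_case_value.toList (PySem.Str.len enum_case_value) 0

-- ===== PORT B =====

-- the `for i, piece in enumerate(pieces)` loop of B; `first = (i == 0)`,
-- `rest = [] = (i == len(pieces) - 1)`, `offset` as in B
def pvB_go (pieces : List (List Char)) (offset : Int) (first : Bool) : List (Int × Int) :=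
  match pieces with
  | [] => []
  | p :: rest =>
    let stripped := PySem.Chars.strip p
    if stripped.isEmpty && rest.isEmpty && !first then []
    else
      let lead : Int := (p.length : Int) - ((PySem.Chars.lstrip p).length : Int)
      (offset + lead, offset + lead + (stripped.length : Int)) ::
        pvB_go rest (offset + (p.length : Int) + 1) false

def split_enum_case_values_into_spans_py_alt (enum_case_value : String) : List (Int × Int) :=
  pvB_go (PySem.Chars.splitOn enum_case_value.toList [',']) 0 true

-- ===== PRECONDITION & SPEC =====

def Spec_split_enum_case_values_into_spans_py (enum_case_value : String) (out : List (Int × Int)) : Prop :=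
  out = split_enum_case_values_into_spans_py_alt enum_case_value

instance (enum_case_value : String) (out : List (Int × Int)) :
    Decidable (Spec_split_enum_case_values_into_spans_py enum_case_value out) := by
  unfold Spec_split_enum_case_values_into_spans_py; infer_instance

-- ===== CLAIM =====

def Claim_equal_split_enum_case_values_into_spans_py : Prop :=
  ∀ (enum_case_value : String), Dom_split_enum_case_values_into_spans_py enum_case_value →
    Spec_split_enum_case_values_into_spans_py enum_case_value
      (split_enum_case_values_into_spans_py enum_case_value)

-- ===== LEMMAS AND PROOFS =====

-- reference splitter: pvSpl t = t.split(',') (proof-side only)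
def pvSpl : List Char → List (List Char)
  | [] => [[]]
  | c :: rest =>
    if c = ',' then [] :: pvSpl rest
    else
      match pvSpl rest with
      | [] => [[c]]
      | p :: ps => (c :: p) :: ps

theorem pvSpl_ne_nil (t : List Char) : pvSpl t ≠ [] := by
  cases t with
  | nil => simp [pvSpl]
  | cons c rest =>
    simp only [pvSpl]
    split_ifs
    · simp
    · cases pvSpl rest <;> simp

theorem pv_go_spl (fuel : Nat) : ∀ (l cur : List Char) (acc : List (List Char)), l.length < fuel →
    PySem.Chars.splitOn.go [','] fuel l cur acc
      = acc.reverse ++ ((pvSpl l).modifyHead (cur.reverse ++ ·)) := by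
  induction fuel with
  | zero => intro l cur acc h; omega
  | succ fuel ih =>
    intro l cur acc h
    cases l with
    | nil => simp [PySem.Chars.splitOn.go, pvSpl]
    | cons c rest =>
      simp only [PySem.Chars.splitOn.go]
      by_cases hc : c = ','
      · subst hc
        have hpre : ([','] : List Char).isPrefixOf (',' :: rest) = true := by
          simp [List.isPrefixOf]
        rw [if_pos hpre]
        have hdrop : List.drop ([','] : List Char).length (',' :: rest) = rest := rfl
        rw [hdrop, ih _ _ _ (by simpa using h)]
        simp only [pvSpl, List.reverse_cons, List.modifyHead, List.append_assoc]
        cases hsp : pvSpl rest with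
        | nil => exact absurd hsp (pvSpl_ne_nil rest)
        | cons p ps => simp
      · have hpre : ([','] : List Char).isPrefixOf (c :: rest) = false := by
          simp [List.isPrefixOf]
          intro hcc; exact hc (Eq.symm hcc)
        rw [if_neg (by simp [hpre])]
        rw [ih _ _ _ (by simpa using h)]
        simp only [pvSpl, if_neg hc]
        cases hsp : pvSpl rest with
        | nil => exact absurd hsp (pvSpl_ne_nil rest)
        | cons p ps => simp [List.modifyHead, List.append_assoc]

theorem pv_splitOn_eq_spl (t : List Char) : PySem.Chars.splitOn t [','] = pvSpl t := by
  unfold PySem.Chars.splitOn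
  rw [pv_go_spl (t.length + 1) t [] [] (by omega)]
  cases hsp : pvSpl t with
  | nil => exact absurd hsp (pvSpl_ne_nil t)
  | cons p ps => simp [List.modifyHead]

theorem pvSpl_no_comma (t : List Char) (h : ',' ∉ t) : pvSpl t = [t] := by
  induction t with
  | nil => rfl
  | cons c rest ih =>
    simp only [List.mem_cons, not_or] at h
    have hne : ¬ (c = ',') := fun hc => h.1 (Eq.symm hc)
    simp only [pvSpl, if_neg hne]
    rw [ih h.2]

theorem pvSpl_comma (p r : List Char) (h : ',' ∉ p) :
    pvSpl (p ++ ',' :: r) = p :: pvSpl r := by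
  induction p with
  | nil => simp [pvSpl]
  | cons c p' ih =>
    simp only [List.mem_cons, not_or] at h
    have hne : ¬ (c = ',') := fun hc => h.1 (Eq.symm hc)
    simp only [List.cons_append, pvSpl, if_neg hne]
    rw [ih h.2]

-- [c] infix iff membership, prefix determines head
theorem pv_infix_singleton (c : Char) (l : List Char) : [c] <:+: l ↔ c ∈ l := by
  constructor
  · rintro ⟨s, t, rfl⟩; simp
  · intro hm
    obtain ⟨s, t, rfl⟩ := List.append_of_mem hm
    exact ⟨s, t, by simp⟩

theorem pv_prefix_singleton_head (c : Char) (l : List Char) (h : [c] <+: l) :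
    l.head? = some c := by
  obtain ⟨t, rfl⟩ := h; rfl

theorem pv_find_no_comma (t : List Char) (h : ',' ∉ t) : PySem.Chars.find t [','] = -1 := by
  rw [PySem.Chars.find_eq_neg_one_iff]
  intro hin
  exact h ((pv_infix_singleton ',' t).mp hin)

theorem pv_find_comma (p r : List Char) (h : ',' ∉ p) :
    PySem.Chars.find (p ++ ',' :: r) [','] = (p.length : Int) := by
  have h0 : 0 ≤ PySem.Chars.find (p ++ ',' :: r) [','] := by
    rw [PySem.Chars.find_nonneg_iff]
    exact (pv_infix_singleton ',' (p ++ ',' :: r)).mpr (by simp)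
  obtain ⟨hpre, hmin⟩ := PySem.Chars.find_spec h0
  have hnotlt : ¬ (PySem.Chars.find (p ++ ',' :: r) [',']).toNat < p.length := by
    intro hlt
    have hd : (p ++ ',' :: r).drop (PySem.Chars.find (p ++ ',' :: r) [',']).toNat
        = p.drop (PySem.Chars.find (p ++ ',' :: r) [',']).toNat ++ ',' :: r :=
      List.drop_append_of_le_length (Nat.le_of_lt hlt)
    have hh := pv_prefix_singleton_head _ _ hpre
    rw [hd] at hh
    cases hpd : p.drop (PySem.Chars.find (p ++ ',' :: r) [',']).toNat with
    | nil =>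
      have := congrArg List.length hpd
      simp at this
      omega
    | cons a b =>
      rw [hpd] at hh
      simp at hh
      apply h
      have : a ∈ p.drop (PySem.Chars.find (p ++ ',' :: r) [',']).toNat := by
        rw [hpd]; exact List.mem_cons_self
      rw [hh] at this
      exact List.mem_of_mem_drop this
  have hnotgt : ¬ p.length < (PySem.Chars.find (p ++ ',' :: r) [',']).toNat := by
    intro hlt
    exact hmin p.length hlt (by rw [List.drop_left]; exact ⟨r, rfl⟩)
  omega

-- dropWhile p l = [] iff every element satisfies p
theorem pv_dropWhile_eq_nil_iff (p : Char → Bool) (l : List Char) :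
    l.dropWhile p = [] ↔ ∀ x ∈ l, p x = true := by
  induction l with
  | nil => simp
  | cons c rest ih =>
    rw [List.dropWhile_cons]
    by_cases hc : p c = true
    · simp [hc, ih]
    · rw [if_neg hc]
      constructor
      · intro h0; exact absurd h0 (List.cons_ne_nil c rest)
      · intro hall; exact absurd (hall c List.mem_cons_self) hc

theorem pv_strip_eq_nil_iff (t : List Char) :
    PySem.Chars.strip t = [] ↔ t.dropWhile PySem.Chars.isspace = [] := by
  constructor
  · intro hnil
    by_contra hne
    have h1 : (List.dropWhile PySem.Chars.isspace
        (List.dropWhile PySem.Chars.isspace t).reverse).reverse = [] := hnil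
    rw [List.reverse_eq_nil_iff, pv_dropWhile_eq_nil_iff] at h1
    have hhead := List.head_dropWhile_not PySem.Chars.isspace hne
    have hmem : (t.dropWhile PySem.Chars.isspace).head hne
        ∈ (t.dropWhile PySem.Chars.isspace).reverse := by
      rw [List.mem_reverse]; exact List.head_mem hne
    have h2 := h1 _ hmem
    rw [h2] at hhead
    simp at hhead
  · intro h
    show PySem.Chars.rstrip (PySem.Chars.lstrip t) = []
    have h1 : PySem.Chars.lstrip t = [] := h
    rw [h1]; rfl

theorem pv_strip_empty_iff (t : List Char) :
    PySem.Chars.strip t = [] ↔ (t.takeWhile PySem.Chars.isspace).length = t.length := by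
  rw [pv_strip_eq_nil_iff]
  have hlen := congrArg List.length
    (List.takeWhile_append_dropWhile (p := PySem.Chars.isspace) (l := t))
  rw [List.length_append] at hlen
  constructor
  · intro hd
    rw [hd] at hlen
    simpa using hlen
  · intro hl
    have hz : (t.dropWhile PySem.Chars.isspace).length = 0 := by omega
    cases hdw : t.dropWhile PySem.Chars.isspace with
    | nil => rfl
    | cons a b => rw [hdw] at hz; simp at hz

-- character read: cs[k+j] comes from the decomposition drop k cs = u ++ v
theorem pv_getElem_from_drop (cs u v : List Char) (k j : Nat)
    (h : cs.drop k = u ++ v) (hj : j < u.length) : cs[k + j]? = some u[j] := by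
  have h1 : cs[k + j]? = (cs.drop k)[j]? := by
    rw [List.getElem?_drop]
  rw [h1, h, List.getElem?_append_left hj, List.getElem?_eq_getElem hj]

theorem pv_pyGetD_at (cs u v : List Char) (k j : Nat)
    (h : cs.drop k = u ++ v) (hj : j < u.length) :
    PySem.List.pyGetD cs ((k : Int) + (j : Int)) ' ' = u[j] := by
  have hnn : (0:Int) ≤ (k : Int) + (j : Int) := by omega
  rw [PySem.List.pyGetD_of_nonneg cs ' ' hnn]
  have h2 : ((k : Int) + (j : Int)).toNat = k + j := by omega
  rw [h2, List.getD_eq_getElem?_getD, pv_getElem_from_drop cs u v k j h hj]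
  rfl

-- the leading-whitespace while loop walks exactly over takeWhile isspace
theorem pv_lead_eq (cs : List Char) (p rest : List Char) (k : Nat)
    (h : cs.drop k = p ++ rest) :
    pvA_lead cs ((k : Int) + (p.length : Int)) (k : Int)
      = (k : Int) + ((p.takeWhile PySem.Chars.isspace).length : Int) := by
  induction p generalizing k with
  | nil =>
    rw [pvA_lead.eq_def]
    simp
  | cons c p' ih =>
    have hc : PySem.List.pyGetD cs ((k : Int)) ' ' = c := by
      have h0 := pv_pyGetD_at cs (c :: p') rest k 0 h (by simp)
      simpa using h0
    rw [pvA_lead.eq_def]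
    by_cases hsp : PySem.Chars.isspace c = true
    · rw [dif_pos ⟨by simp only [List.length_cons]; omega, by rw [hc]; exact hsp⟩]
      have h' : cs.drop (k + 1) = p' ++ rest := by
        have h1 : cs.drop (k + 1) = (cs.drop k).drop 1 := List.drop_drop.symm
        rw [h1, h]; rfl
      have hih := ih (k + 1) h'
      have harg : (k : Int) + ((c :: p').length : Int) = ((k+1 : Nat) : Int) + (p'.length : Int) := by
        simp only [List.length_cons]; omega
      have harg2 : (k : Int) + 1 = ((k+1 : Nat) : Int) := by omega
      rw [harg, harg2, hih]
      rw [List.takeWhile_cons, if_pos hsp]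
      simp only [List.length_cons]; omega
    · rw [dif_neg (by rw [hc]; exact fun hcon => hsp hcon.2)]
      rw [List.takeWhile_cons, if_neg hsp]
      simp

-- the trailing-whitespace while loop strips exactly rstrip
theorem pv_trail_base (cs : List Char) (k : Nat) :
    pvA_trail cs (k : Int) ((k : Int) + (([] : List Char).length : Int))
      = (k : Int) + ((PySem.Chars.rstrip []).length : Int) := by
  rw [pvA_trail.eq_def]
  simp [PySem.Chars.rstrip]

theorem pv_trail_eq_aux (cs : List Char) : ∀ (m : Nat) (q rest : List Char) (k : Nat),
    q.length ≤ m → cs.drop k = q ++ rest →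
    pvA_trail cs (k : Int) ((k : Int) + (q.length : Int))
      = (k : Int) + ((PySem.Chars.rstrip q).length : Int) := by
  intro m
  induction m with
  | zero =>
    intro q rest k hq h
    cases q with
    | nil => exact pv_trail_base cs k
    | cons a b => simp at hq
  | succ m ihm =>
    intro q rest k hq h
    cases hrev : q.reverse with
    | nil =>
      have hq0 : q = [] := by
        rw [← q.reverse_reverse, hrev]; rfl
      rw [hq0]
      exact pv_trail_base cs k
    | cons c w =>
      have hq2 : q = w.reverse ++ [c] := by
        rw [← q.reverse_reverse, hrev, List.reverse_cons]
      have hlw : w.reverse.length + 1 = q.length := by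
        rw [hq2]; simp
      rw [hq2] at h ⊢
      have hc : PySem.List.pyGetD cs ((k : Int) + (w.reverse.length : Int)) ' ' = c := by
        have h0 := pv_pyGetD_at cs (w.reverse ++ [c]) rest k w.reverse.length
          (by simpa using h) (by simp)
        simpa using h0
      have hidx : (k : Int) + ((w.reverse ++ [c]).length : Int) - 1
          = (k : Int) + (w.reverse.length : Int) := by
        simp only [List.length_append, List.length_cons, List.length_nil]; omega
      rw [pvA_trail.eq_def]
      by_cases hsp : PySem.Chars.isspace c = true
      · rw [dif_pos ⟨by simp only [List.length_append, List.length_cons, List.length_nil]; omega,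
          by rw [hidx, hc]; exact hsp⟩]
        rw [hidx]
        have h' : cs.drop k = w.reverse ++ (c :: rest) := by simpa using h
        rw [ihm w.reverse (c :: rest) k (by omega) h']
        have hr : PySem.Chars.rstrip (w.reverse ++ [c]) = PySem.Chars.rstrip w.reverse := by
          unfold PySem.Chars.rstrip
          rw [List.reverse_append]
          simp [hsp]
        rw [hr]
      · rw [dif_neg (by rw [hidx, hc]; exact fun hcon => hsp hcon.2)]
        have hr : PySem.Chars.rstrip (w.reverse ++ [c]) = w.reverse ++ [c] := by
          unfold PySem.Chars.rstrip
          rw [List.reverse_append]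
          simp [hsp]
        rw [hr]

theorem pv_trail_eq (cs : List Char) (q rest : List Char) (k : Nat)
    (h : cs.drop k = q ++ rest) :
    pvA_trail cs (k : Int) ((k : Int) + (q.length : Int))
      = (k : Int) + ((PySem.Chars.rstrip q).length : Int) :=
  pv_trail_eq_aux cs q.length q rest k (Nat.le_refl _) h

-- findFrom with end == len(s) behaves like findFrom without an end bound
theorem pv_findFrom_some_len (s sub : List Char) (st : Int) :
    PySem.Chars.findFrom s sub st (some (s.length : Int))
      = PySem.Chars.findFrom s sub st none := by
  unfold PySem.Chars.findFrom
  simp [show ¬((s.length : Int) < 0) from by omega]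

-- A's trimming of the piece p = cs[k : k+len(p)]
theorem pv_trim_lead (cs p rest : List Char) (k : Nat) (h : cs.drop k = p ++ rest) :
    pvA_lead cs ((k : Int) + (p.length : Int)) (k : Int)
      = ((k + (p.takeWhile PySem.Chars.isspace).length : Nat) : Int) := by
  rw [pv_lead_eq cs p rest k h]
  omega

theorem pv_trim_trail (cs p rest : List Char) (k : Nat) (h : cs.drop k = p ++ rest) :
    pvA_trail cs ((k + (p.takeWhile PySem.Chars.isspace).length : Nat) : Int)
        ((k : Int) + (p.length : Int))
      = ((k + (p.takeWhile PySem.Chars.isspace).length : Nat) : Int)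
          + ((PySem.Chars.strip p).length : Int) := by
  have hlen := congrArg List.length
    (List.takeWhile_append_dropWhile (p := PySem.Chars.isspace) (l := p))
  rw [List.length_append] at hlen
  have hdrop' : cs.drop (k + (p.takeWhile PySem.Chars.isspace).length)
      = p.dropWhile PySem.Chars.isspace ++ rest := by
    have h1 : cs.drop (k + (p.takeWhile PySem.Chars.isspace).length)
        = (cs.drop k).drop (p.takeWhile PySem.Chars.isspace).length := by
      rw [List.drop_drop]
    rw [h1, h, List.drop_append_of_le_length (by omega)]
    have h3 := List.takeWhile_append_dropWhile (p := PySem.Chars.isspace) (l := p)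
    have h2 : p.drop (p.takeWhile PySem.Chars.isspace).length = p.dropWhile PySem.Chars.isspace := by
      calc p.drop (p.takeWhile PySem.Chars.isspace).length
          = (p.takeWhile PySem.Chars.isspace ++ p.dropWhile PySem.Chars.isspace).drop
              (p.takeWhile PySem.Chars.isspace).length := by rw [h3]
        _ = p.dropWhile PySem.Chars.isspace := List.drop_left
    rw [h2]
  have ht := pv_trail_eq cs (p.dropWhile PySem.Chars.isspace) rest
    (k + (p.takeWhile PySem.Chars.isspace).length) hdrop'
  have harg : ((k + (p.takeWhile PySem.Chars.isspace).length : Nat) : Int)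
      + ((p.dropWhile PySem.Chars.isspace).length : Int) = (k : Int) + (p.length : Int) := by
    omega
  rw [harg] at ht
  rw [ht]
  rfl

-- B's step lemmas
theorem pvB_go_cons_ne (p : List Char) (rest : List (List Char)) (off : Int) (b : Bool)
    (hne : rest ≠ []) :
    pvB_go (p :: rest) off b
      = (off + ((p.length : Int) - ((PySem.Chars.lstrip p).length : Int)),
         off + ((p.length : Int) - ((PySem.Chars.lstrip p).length : Int))
           + ((PySem.Chars.strip p).length : Int))
        :: pvB_go rest (off + (p.length : Int) + 1) false := by
  cases rest with
  | nil => exact absurd rfl hne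
  | cons a b' => simp [pvB_go]

theorem pvB_go_single (p : List Char) (off : Int) (b : Bool) :
    pvB_go [p] off b
      = if (PySem.Chars.strip p).isEmpty && !b then []
        else [(off + ((p.length : Int) - ((PySem.Chars.lstrip p).length : Int)),
               off + ((p.length : Int) - ((PySem.Chars.lstrip p).length : Int))
                 + ((PySem.Chars.strip p).length : Int))] := by
  simp only [pvB_go, List.isEmpty_nil, Bool.and_true]


theorem pv_dropWhile_comma_head (l : List Char) (a : Char) (b : List Char)
    (hd : l.dropWhile (fun c => !(c = ',' : Bool)) = a :: b) : a = ',' := by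
  induction l with
  | nil => simp at hd
  | cons c rest ih =>
    rw [List.dropWhile_cons] at hd
    by_cases hc : c = ','
    · rw [if_neg (by simp [hc])] at hd
      injection hd with h1 h2
      rw [← h1]; exact hc
    · rw [if_pos (by simp [hc])] at hd
      exact ih hd

theorem pv_mem_takeWhile (p : Char → Bool) (l : List Char) (x : Char)
    (h : x ∈ l.takeWhile p) : p x = true := by
  induction l with
  | nil => simp at h
  | cons c rest ih =>
    rw [List.takeWhile_cons] at h
    by_cases hc : p c = true
    · rw [if_pos hc] at h
      rcases List.mem_cons.mp h with rfl | hm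
      · exact hc
      · exact ih hm
    · rw [if_neg hc] at h
      simp at h

-- main loop ≡ piece walk over the split
theorem pv_main (cs : List Char) : ∀ (n k : Nat), k ≤ cs.length → cs.length - k = n →
    pvA_loop cs (cs.length : Int) (k : Int)
      = pvB_go (pvSpl (cs.drop k)) (k : Int) (decide (k = 0)) := by
  intro n
  induction n using Nat.strongRecOn with
  | ind n ih =>
    intro k hk hn
    have hlen_t : (cs.drop k).length = cs.length - k := List.length_drop
    rw [pvA_loop.eq_def]
    rw [dif_pos (by omega : (k : Int) ≤ (cs.length : Int))]
    simp only [pv_findFrom_some_len, PySem.Chars.findFrom_natCast cs [','] k hk]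
    by_cases hcomma : ',' ∈ cs.drop k
    · -- there is a comma: first piece p, then ',' then r
      have h0 := List.takeWhile_append_dropWhile
        (p := fun c => !(c = ',' : Bool)) (l := cs.drop k)
      cases hd : (cs.drop k).dropWhile (fun c => !(c = ',' : Bool)) with
      | nil =>
        exfalso
        rw [pv_dropWhile_eq_nil_iff] at hd
        have h1 := hd ',' hcomma
        simp at h1
      | cons a r =>
      have ha : a = ',' := pv_dropWhile_comma_head _ _ _ hd
      rw [hd, ha] at h0
      generalize hP : (cs.drop k).takeWhile (fun c => !(c = ',' : Bool)) = p at h0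
      have hsplit : cs.drop k = p ++ ',' :: r := h0.symm
      have hnp : ',' ∉ p := by
        intro hmem
        rw [← hP] at hmem
        have h1 := pv_mem_takeWhile _ _ _ hmem
        simp at h1
      have hfind : PySem.Chars.find (cs.drop k) [','] = (p.length : Int) := by
        rw [hsplit]; exact pv_find_comma p r hnp
      have hlen : cs.length = k + p.length + 1 + r.length := by
        have h0 := congrArg List.length hsplit
        rw [List.length_append, List.length_cons] at h0
        omega
      have hdelim : (if (if PySem.Chars.find (cs.drop k) [','] = -1 then (-1 : Int)
              else (k : Int) + PySem.Chars.find (cs.drop k) [',']) < 0 then (cs.length : Int)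
            else if PySem.Chars.find (cs.drop k) [','] = -1 then (-1 : Int)
              else (k : Int) + PySem.Chars.find (cs.drop k) [','])
          = (k : Int) + (p.length : Int) := by
        rw [hfind]
        rw [if_neg (by omega : ¬ ((p.length : Int) = -1))]
        rw [if_neg (by omega : ¬ ((k : Int) + (p.length : Int) < 0))]
      rw [hdelim]
      rw [pv_trim_lead cs p (',' :: r) k hsplit]
      rw [pv_trim_trail cs p (',' :: r) k hsplit]
      rw [if_neg (by
        intro hcon
        have h2 : ((k + (p.takeWhile PySem.Chars.isspace).length : Nat) : Int)
            = (cs.length : Int) := hcon.1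
        have h1 := congrArg List.length
          (List.takeWhile_append_dropWhile (p := PySem.Chars.isspace) (l := p))
        rw [List.length_append] at h1
        omega)]
      -- B side
      rw [hsplit, pvSpl_comma p r hnp]
      rw [pvB_go_cons_ne p (pvSpl r) (k : Int) _ (pvSpl_ne_nil r)]
      have hlstrip : (PySem.Chars.lstrip p).length = (p.dropWhile PySem.Chars.isspace).length := rfl
      have hlenp := congrArg List.length
        (List.takeWhile_append_dropWhile (p := PySem.Chars.isspace) (l := p))
      rw [List.length_append] at hlenp
      have hrec : cs.drop (k + p.length + 1) = r := by
        have h1 : cs.drop (k + p.length + 1) = (cs.drop k).drop (p.length + 1) := by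
          rw [Nat.add_assoc, List.drop_drop]
        rw [h1, hsplit]
        have h2 : p ++ ',' :: r = (p ++ [',']) ++ r := by simp
        rw [h2]
        have h3 : p.length + 1 = (p ++ [',']).length := by simp
        rw [h3, List.drop_left]
      have hm : cs.length - (k + p.length + 1) < n := by omega
      have hk' : k + p.length + 1 ≤ cs.length := by omega
      have hih := ih _ hm (k + p.length + 1) hk' rfl
      rw [hrec] at hih
      have hdec : (decide (k + p.length + 1 = 0)) = false := by simp
      rw [hdec] at hih
      have hcast : ((k : Int) + (p.length : Int)) + 1 = ((k + p.length + 1 : Nat) : Int) := by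
        omega
      rw [hcast, hih]
      have hoff : ((k + p.length + 1 : Nat) : Int) = (k : Int) + (p.length : Int) + 1 := by
        omega
      rw [hoff]
      congr 1
      simp only [Prod.mk.injEq]
      rw [hlstrip]
      constructor <;> omega
    · -- no comma: the whole suffix is the last piece
      have hfind : PySem.Chars.find (cs.drop k) [','] = -1 := pv_find_no_comma _ hcomma
      have hdelim : (if (if PySem.Chars.find (cs.drop k) [','] = -1 then (-1 : Int)
              else (k : Int) + PySem.Chars.find (cs.drop k) [',']) < 0 then (cs.length : Int)
            else if PySem.Chars.find (cs.drop k) [','] = -1 then (-1 : Int)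
              else (k : Int) + PySem.Chars.find (cs.drop k) [','])
          = (cs.length : Int) := by
        rw [hfind]; simp
      rw [hdelim]
      have hlen : cs.length = k + (cs.drop k).length := by omega
      have hdropk : cs.drop k = cs.drop k ++ [] := by simp
      have hend : (cs.length : Int) = (k : Int) + ((cs.drop k).length : Int) := by omega
      rw [show (cs.length : Int) = (k : Int) + ((cs.drop k).length : Int) from hend]
      rw [pv_trim_lead cs (cs.drop k) [] k hdropk]
      rw [pv_trim_trail cs (cs.drop k) [] k hdropk]
      rw [pvSpl_no_comma _ hcomma]
      rw [pvB_go_single]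
      have hlstrip : (PySem.Chars.lstrip (cs.drop k)).length
          = ((cs.drop k).dropWhile PySem.Chars.isspace).length := rfl
      have hlenp := congrArg List.length
        (List.takeWhile_append_dropWhile (p := PySem.Chars.isspace) (l := cs.drop k))
      rw [List.length_append] at hlenp
      by_cases hbr : ((cs.drop k).takeWhile PySem.Chars.isspace).length = (cs.drop k).length
          ∧ k ≠ 0
      · rw [if_pos ⟨by omega, by omega⟩]
        have hse : PySem.Chars.strip (cs.drop k) = [] := (pv_strip_empty_iff _).mpr hbr.1
        rw [if_pos (by simp [hse, hbr.2])]
      · rw [if_neg (by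
          intro hcon
          apply hbr
          have h0 := hcon.1
          have h1 := hcon.2
          exact ⟨by omega, by
            intro hk0
            apply h1
            rw [hk0]
            rfl⟩)]
        have hcb : ((PySem.Chars.strip (cs.drop k)).isEmpty && !(decide (k = 0))) = false := by
          by_cases hk0 : k = 0
          · simp [hk0]
          · have hne : ¬ ((cs.drop k).takeWhile PySem.Chars.isspace).length
                = (cs.drop k).length := fun hc => hbr ⟨hc, hk0⟩
            have hsne : PySem.Chars.strip (cs.drop k) ≠ [] :=
              fun hc => hne ((pv_strip_empty_iff _).mp hc)
            have h2 : (PySem.Chars.strip (cs.drop k)).isEmpty = false := by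
              cases hsc : PySem.Chars.strip (cs.drop k) with
              | nil => exact absurd hsc hsne
              | cons a b => rfl
            simp [h2]
        rw [hcb]
        simp only [Bool.false_eq_true, if_false]
        -- both recursions are empty
        rw [pvA_loop.eq_def]
        rw [dif_neg (by omega)]
        congr 1
        simp only [Prod.mk.injEq]
        rw [hlstrip]
        constructor <;> omega

-- ===== VERDICT =====

theorem split_enum_case_values_into_spans_py_spec :
    Claim_equal_split_enum_case_values_into_spans_py := by
  unfold Claim_equal_split_enum_case_values_into_spans_py
  intro s _
  unfold Spec_split_enum_case_values_into_spans_py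
  unfold split_enum_case_values_into_spans_py split_enum_case_values_into_spans_py_alt
  rw [pv_splitOn_eq_spl]
  have h0 : PySem.Str.len s = ((s.toList.length : Nat) : Int) := by simp
  rw [h0]
  have hm := pv_main s.toList (s.toList.length - 0) 0 (by omega) (by omega)
  simpa using hm
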